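-- pv_equiv track=rewrite | github.com/pypi-data/pypi-mirror-339 | packages/mag-tools/mag_tools-0.3.142-py3-none-any.whl/mag_tools/utils/data/list_utils.py | split_by_empty_line
-- ===== SOURCE A (Python) =====
-- def split_by_empty_line(lines: list[str]) -> list[list[str]]:
--     """
--     根据空行将字符串数组切分成若干块，并删除空行。
--
--     参数：
--     :param lines: 字符串数组
--     :return: 切分后的块列表，每个块是一个字符串数组
--     """
--     blocks = []
--     current_block = []
--
--     for line in lines:
--         if line.strip() == '':
--             if current_block:
--                 blocks.append(current_block)
--                 current_block = []
--         else:
--             current_block.append(line)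
--
--     if current_block:
--         blocks.append(current_block)
--
--     return blocks
-- ===== SOURCE B (Python) =====
-- from itertools import groupby
--
-- def split_by_empty_line(lines: list[str]) -> list[list[str]]:
--     return [list(g) for blank, g in groupby(lines, key=lambda l: l.strip() == '') if not blank]
-- ===== Notes on version B (the rewrite author's own statement) =====
-- stated objective: idiomatic
-- what changed: Replaces the explicit current_block accumulate/flush loop with itertools.groupby keyed on blankness, keeping only the non-blank groups.
import Mathlib
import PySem

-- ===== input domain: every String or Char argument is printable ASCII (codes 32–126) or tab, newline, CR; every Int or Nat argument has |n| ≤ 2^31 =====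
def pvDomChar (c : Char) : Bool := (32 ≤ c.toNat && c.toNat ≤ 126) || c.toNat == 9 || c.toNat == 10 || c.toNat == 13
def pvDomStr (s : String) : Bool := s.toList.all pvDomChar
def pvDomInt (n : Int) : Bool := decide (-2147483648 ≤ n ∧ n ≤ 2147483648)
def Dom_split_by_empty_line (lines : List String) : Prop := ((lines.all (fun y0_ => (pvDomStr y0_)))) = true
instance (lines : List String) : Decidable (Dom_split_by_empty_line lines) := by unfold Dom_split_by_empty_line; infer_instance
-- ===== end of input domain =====

-- ===== PORT A =====
-- A: explicit accumulator loop; B: groupby-style run splitting keeping non-blank runs.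
def pvBlank (s : String) : Bool := PySem.Str.strip s == ""

def pvStepA (st : List (List String) × List String) (line : String) :
    List (List String) × List String :=
  if pvBlank line then
    (if st.2.isEmpty then st else (st.1 ++ [st.2], []))
  else (st.1, st.2 ++ [line])

def split_by_empty_line (lines : List String) : List (List String) :=
  let st := lines.foldl pvStepA ([], [])
  if st.2.isEmpty then st.1 else st.1 ++ [st.2]

-- ===== PORT B =====
-- transliteration of groupby over the blankness key: consume one maximal run per step
def split_by_empty_line_alt (lines : List String) : List (List String) :=
  match lines with
  | [] => []
  | l :: rest =>
      let k := pvBlank l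
      let grp := l :: rest.takeWhile (fun x => pvBlank x == k)
      let rest' := rest.dropWhile (fun x => pvBlank x == k)
      (if k then [] else [grp]) ++ split_by_empty_line_alt rest'
termination_by lines.length
decreasing_by
  simp only [List.length_cons]
  exact Nat.lt_succ_of_le (List.length_dropWhile_le _ _)

-- ===== PRECONDITION & SPEC =====
def Spec_split_by_empty_line (lines : List String) (out : List (List String)) : Prop := out = split_by_empty_line_alt lines
instance (lines : List String) (out : List (List String)) : Decidable (Spec_split_by_empty_line lines out) := by unfold Spec_split_by_empty_line; infer_instance

-- ===== CLAIM (what is proved, stated in full; the proofs are below) =====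
def Claim_equal_split_by_empty_line : Prop := ∀ (lines : List String), Dom_split_by_empty_line lines → Spec_split_by_empty_line lines (split_by_empty_line lines)

-- ===== LEMMAS AND PROOFS =====
theorem alt_nil : split_by_empty_line_alt [] = [] := by
  simp [split_by_empty_line_alt]

theorem alt_cons_blank (l : String) (ls : List String) (h : pvBlank l = true) :
    split_by_empty_line_alt (l :: ls) =
      split_by_empty_line_alt (ls.dropWhile (fun x => pvBlank x)) := by
  rw [split_by_empty_line_alt]
  simp [h]

theorem alt_cons_nonblank (l : String) (ls : List String) (h : pvBlank l = false) :
    split_by_empty_line_alt (l :: ls) =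
      (l :: ls.takeWhile (fun x => !pvBlank x)) ::
        split_by_empty_line_alt (ls.dropWhile (fun x => !pvBlank x)) := by
  rw [split_by_empty_line_alt]
  simp [h]

theorem alt_dropWhile_blank (ls : List String) :
    split_by_empty_line_alt (ls.dropWhile (fun x => pvBlank x)) =
      split_by_empty_line_alt ls := by
  cases ls with
  | nil => rfl
  | cons c t =>
      by_cases h : pvBlank c = true
      · rw [List.dropWhile_cons_of_pos (by simp [h]), alt_cons_blank c t h]
      · rw [List.dropWhile_cons_of_neg (by simp at h; simp [h])]

def pvFin (st : List (List String) × List String) : List (List String) :=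
  if st.2.isEmpty then st.1 else st.1 ++ [st.2]

theorem foldl_key : ∀ (lines : List String) (blocks : List (List String)) (cur : List String),
    pvFin (lines.foldl pvStepA (blocks, cur)) =
      (if cur.isEmpty then blocks ++ split_by_empty_line_alt lines
       else blocks ++ [cur ++ lines.takeWhile (fun x => !pvBlank x)] ++
          split_by_empty_line_alt (lines.dropWhile (fun x => !pvBlank x))) := by
  intro lines
  induction lines with
  | nil =>
      intro blocks cur
      by_cases hc : cur.isEmpty
      · have hcn : cur = [] := List.isEmpty_iff.mp hc
        simp [pvFin, hcn, alt_nil]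
      · simp [pvFin, hc, alt_nil]
  | cons l ls ih =>
      intro blocks cur
      by_cases hb : pvBlank l = true
      · by_cases hc : cur.isEmpty
        · have hcn : cur = [] := List.isEmpty_iff.mp hc
          rw [List.foldl_cons, show pvStepA (blocks, cur) l = (blocks, cur) by
              simp [pvStepA, hb, hcn], ih, alt_cons_blank l ls hb, alt_dropWhile_blank]
          simp [hcn]
        · rw [List.foldl_cons, show pvStepA (blocks, cur) l = (blocks ++ [cur], []) by
              simp [pvStepA, hb, hc], ih,
            List.takeWhile_cons_of_neg (p := fun x => !pvBlank x) (by simp [hb]),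
            List.dropWhile_cons_of_neg (p := fun x => !pvBlank x) (by simp [hb]),
            alt_cons_blank l ls hb, alt_dropWhile_blank]
          simp [hc]
      · have hb' : pvBlank l = false := by simpa using hb
        by_cases hc : cur.isEmpty
        · have hcn : cur = [] := List.isEmpty_iff.mp hc
          rw [List.foldl_cons, show pvStepA (blocks, cur) l = (blocks, cur ++ [l]) by
              simp [pvStepA, hb'], ih, alt_cons_nonblank l ls hb']
          simp [hcn]
        · rw [List.foldl_cons, show pvStepA (blocks, cur) l = (blocks, cur ++ [l]) by
              simp [pvStepA, hb'], ih,
            List.takeWhile_cons_of_pos (p := fun x => !pvBlank x) (by simp [hb']),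
            List.dropWhile_cons_of_pos (p := fun x => !pvBlank x) (by simp [hb'])]
          simp [hc]

-- ===== VERDICT (by name: the statement is the Claim_ definition above) =====
theorem split_by_empty_line_spec : Claim_equal_split_by_empty_line := by
  intro lines _
  unfold Spec_split_by_empty_line split_by_empty_line
  have h := foldl_key lines [] []
  simp only [pvFin] at h
  simpa using h
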